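-- pv_equiv track=rewrite | github.com/zlliu246/print_btree | src/print_btree/helpers/string_helper.py | get_pipe_line
-- ===== SOURCE A (Python) =====
-- def get_pipe_line(previous_underscore_line: str) -> str:
--     """
--     Gets pipe line based on previous underscore line
--
--     Given   "    ___apple___     ___orange___"
--     return  "    |         |     |          |"
--     """
--     previous_underscore_line = " " + previous_underscore_line + " "
--     chars: list[str] = [" "] * len(previous_underscore_line)
--     for index in range(1, len(previous_underscore_line)-1):
--         char: str = previous_underscore_line[index]
--         prev_char: str = previous_underscore_line[index-1]
--         next_char: str = previous_underscore_line[index+1]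
--         if char == "_":
--             if prev_char == " ":
--                 chars[index] = "|"
--             elif next_char == " ":
--                 chars[index] = "|"
--     return "".join(chars)[1:-1]
-- ===== SOURCE B (Python) =====
-- def get_pipe_line(previous_underscore_line: str) -> str:
--     """Run-based rewrite: emit the output chunk-by-chunk, one maximal
--     underscore run (or single non-underscore char) at a time."""
--     s = previous_underscore_line
--     n = len(s)
--     out = []
--     prev = " "          # character just before the current position ("" edge acts as a space)
--     i = 0
--     while i < n:
--         c = s[i]
--         if c != "_":
--             out.append(" ")
--             prev = c
--             i += 1
--         else:
--             k = 1                       # length of the maximal underscore run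
--             while i + k < n and s[i + k] == "_":
--                 k += 1
--             left_open = prev == " "
--             right_open = i + k == n or s[i + k] == " "
--             if k == 1:
--                 out.append("|" if (left_open or right_open) else " ")
--             else:
--                 out.append("|" if left_open else " ")
--                 out.append(" " * (k - 2))
--                 out.append("|" if right_open else " ")
--             prev = "_"
--             i += k
--     return "".join(out)
-- ===== Notes on version B (the rewrite author's own statement) =====
-- stated objective: alternative
-- what changed: B drops A's space-padding and per-index neighbour scan over a mutable char array: it walks the string once, emitting the output chunk-by-chunk per maximal underscore run (pipe at a run end iff the adjacent character, or string edge, is a space), carrying the previous character instead of padding.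
import Mathlib
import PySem

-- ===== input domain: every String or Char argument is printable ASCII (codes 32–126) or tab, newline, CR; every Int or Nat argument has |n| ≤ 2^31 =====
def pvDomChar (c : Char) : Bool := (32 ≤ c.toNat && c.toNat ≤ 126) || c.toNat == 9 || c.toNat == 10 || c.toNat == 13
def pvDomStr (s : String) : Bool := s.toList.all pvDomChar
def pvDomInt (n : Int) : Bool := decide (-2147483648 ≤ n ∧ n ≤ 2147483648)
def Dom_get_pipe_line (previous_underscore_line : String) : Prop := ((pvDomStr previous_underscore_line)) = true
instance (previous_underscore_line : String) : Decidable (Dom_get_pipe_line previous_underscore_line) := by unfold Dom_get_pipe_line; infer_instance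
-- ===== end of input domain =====

-- B replaces A's space-padded per-index neighbour scan over a mutable char array with a
-- single left-to-right pass that emits the output chunk-by-chunk per maximal underscore run
-- (objective: alternative decomposition, same O(n) cost).

-- ===== PORT A =====
def get_pipe_line (previous_underscore_line : String) : String :=
  let p : List Char := (' ' :: previous_underscore_line.toList) ++ [' ']
  let chars : List Char := List.replicate p.length ' '
  let chars := (PySem.List.pyRange 1 ((p.length : Int) - 1) 1).foldl
    (fun ch idx =>
      let char : Char := PySem.List.pyGetD p idx ' '
      let prev_char : Char := PySem.List.pyGetD p (idx - 1) ' '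
      let next_char : Char := PySem.List.pyGetD p (idx + 1) ' '
      if char = '_' then
        if prev_char = ' ' then PySem.List.pySetD ch idx '|'
        else if next_char = ' ' then PySem.List.pySetD ch idx '|'
        else ch
      else ch) chars
  String.ofList (PySem.List.slice chars (some 1) (some (-1)))

-- ===== PORT B =====
def pvCountLead : List Char → Nat
  | [] => 0
  | c :: r => if c = '_' then pvCountLead r + 1 else 0

def pvPipeRun (k : Nat) (lopen ropen : Bool) : List Char :=
  if k = 1 then [if lopen || ropen then '|' else ' ']
  else (if lopen then '|' else ' ') :: (List.replicate (k - 2) ' ' ++ [if ropen then '|' else ' '])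

def pvBGo : Char → List Char → List Char
  | _, [] => []
  | prev, c :: rest =>
    if c ≠ '_' then ' ' :: pvBGo c rest
    else
      let k : Nat := 1 + pvCountLead rest
      let rest' : List Char := rest.drop (k - 1)
      pvPipeRun k (prev == ' ') (rest'.headD ' ' == ' ') ++ pvBGo '_' rest'
termination_by _ cs => cs.length
decreasing_by all_goals simp [List.length_drop]

def get_pipe_line_alt (previous_underscore_line : String) : String :=
  String.ofList (pvBGo ' ' previous_underscore_line.toList)

-- ===== PRECONDITION & SPEC =====
def Spec_get_pipe_line (previous_underscore_line : String) (out : String) : Prop := out = get_pipe_line_alt previous_underscore_line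
instance (previous_underscore_line : String) (out : String) : Decidable (Spec_get_pipe_line previous_underscore_line out) := by unfold Spec_get_pipe_line; infer_instance

-- ===== CLAIM =====
def Claim_equal_get_pipe_line : Prop := ∀ (previous_underscore_line : String), Dom_get_pipe_line previous_underscore_line → Spec_get_pipe_line previous_underscore_line (get_pipe_line previous_underscore_line)

-- ===== LEMMAS AND PROOFS =====
-- reference: one output char per input char, window (prev, c, next)
def pvSpecGo : Char → List Char → List Char
  | _, [] => []
  | prev, c :: rest =>
    (if c = '_' ∧ (prev = ' ' ∨ rest.headD ' ' = ' ') then '|' else ' ') :: pvSpecGo c rest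

theorem pvSpecGo_length (prev : Char) (cs : List Char) : (pvSpecGo prev cs).length = cs.length := by
  induction cs generalizing prev with
  | nil => rfl
  | cons c rest ih => simp [pvSpecGo, ih]


theorem pvCountLead_decomp : ∀ cs : List Char, List.replicate (pvCountLead cs) '_' ++ cs.drop (pvCountLead cs) = cs := by
  intro cs
  induction cs with
  | nil => rfl
  | cons c r ih =>
    by_cases h : c = '_'
    · simp [pvCountLead, h, List.replicate_succ, ih]
    · simp [pvCountLead, h]

theorem pvCountLead_head : ∀ cs : List Char, (cs.drop (pvCountLead cs)).headD ' ' ≠ '_' := by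
  intro cs
  induction cs with
  | nil => decide
  | cons c r ih =>
    by_cases h : c = '_'
    · simpa [pvCountLead, h] using ih
    · simp [pvCountLead, h]

theorem pvPipeRun_succ (k : Nat) (l ropn : Bool) :
    pvPipeRun (k+2) l ropn = (if l then '|' else ' ') :: pvPipeRun (k+1) false ropn := by
  cases k <;> simp [pvPipeRun, List.replicate_succ]

theorem pvSpecGo_run (k : Nat) (rest' : List Char) (_h : rest'.headD ' ' ≠ '_') :
    ∀ prev : Char, pvSpecGo prev (List.replicate (k+1) '_' ++ rest')
      = pvPipeRun (k+1) (prev == ' ') (rest'.headD ' ' == ' ') ++ pvSpecGo '_' rest' := by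
  induction k with
  | zero =>
    intro prev
    by_cases hp : prev = ' '
    · simp [pvSpecGo, pvPipeRun, hp]
    · by_cases hr : rest'.headD ' ' = ' '
      · simp [pvSpecGo, pvPipeRun, hp]
      · simp [pvSpecGo, pvPipeRun, hp, List.headD_eq_head?_getD]
  | succ k ih =>
    intro prev
    rw [pvPipeRun_succ]
    have hh : (List.replicate (k+1) '_' ++ rest').headD ' ' = '_' := by
      simp [List.replicate_succ]
    by_cases hp : prev = ' ' <;>
      simp [List.replicate_succ (n := k+1), pvSpecGo, hp, ih, List.head?_replicate]

theorem pvB_eq_spec_aux (n : Nat) : ∀ cs : List Char, cs.length ≤ n → ∀ prev : Char, pvBGo prev cs = pvSpecGo prev cs := by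
  induction n with
  | zero =>
    intro cs h prev
    have : cs = [] := by cases cs <;> simp_all
    subst this; simp [pvBGo, pvSpecGo]
  | succ n ih =>
    intro cs hlen prev
    match cs with
    | [] => simp [pvBGo, pvSpecGo]
    | c :: rest =>
      by_cases hc : c = '_'
      · subst hc
        rw [pvBGo]
        simp only [ne_eq, not_true_eq_false, if_false]
        have hd := pvCountLead_decomp rest
        have hh := pvCountLead_head rest
        have hrl : (rest.drop (pvCountLead rest)).length ≤ n := by
          have hld : (rest.drop (pvCountLead rest)).length = rest.length - pvCountLead rest := List.length_drop
          simp at hlen; omega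
        have hrun := pvSpecGo_run (pvCountLead rest) (rest.drop (pvCountLead rest)) hh prev
        calc pvPipeRun (1 + pvCountLead rest) (prev == ' ')
                (((rest.drop (1 + pvCountLead rest - 1)).headD ' ') == ' ')
              ++ pvBGo '_' (rest.drop (1 + pvCountLead rest - 1))
            = pvPipeRun (pvCountLead rest + 1) (prev == ' ')
                (((rest.drop (pvCountLead rest)).headD ' ') == ' ')
              ++ pvSpecGo '_' (rest.drop (pvCountLead rest)) := by
              rw [Nat.add_comm 1 (pvCountLead rest)]
              simp [ih _ hrl]
          _ = pvSpecGo prev ('_' :: rest) := by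
              conv_rhs => rw [show ('_' :: rest) = List.replicate (pvCountLead rest + 1) '_' ++ rest.drop (pvCountLead rest) by
                rw [List.replicate_succ]; simp [hd]]
              rw [hrun]
      · rw [pvBGo]
        simp only [hc, if_pos, ne_eq, not_false_eq_true]
        have : rest.length ≤ n := by simp at hlen; omega
        simp [pvSpecGo, hc, ih rest this c]

theorem pvB_eq_spec (cs : List Char) (prev : Char) : pvBGo prev cs = pvSpecGo prev cs :=
  pvB_eq_spec_aux cs.length cs le_rfl prev


def pvAChar (p : List Char) (j : Nat) : Char :=
  if p.getD j ' ' = '_' ∧ (p.getD (j-1) ' ' = ' ' ∨ p.getD (j+1) ' ' = ' ') then '|' else ' '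

def pvStep (p : List Char) (ch : List Char) (idx : Int) : List Char :=
  let char : Char := PySem.List.pyGetD p idx ' '
  let prev_char : Char := PySem.List.pyGetD p (idx - 1) ' '
  let next_char : Char := PySem.List.pyGetD p (idx + 1) ' '
  if char = '_' then
    if prev_char = ' ' then PySem.List.pySetD ch idx '|'
    else if next_char = ' ' then PySem.List.pySetD ch idx '|'
    else ch
  else ch

theorem pvSet_map_range {α : Type} (m i : Nat) (f : Nat → α) (v : α) :
    ((List.range m).map f).set i v = (List.range m).map (fun j => if j = i then v else f j) := by
  apply List.ext_getElem
  · simp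
  · intro j h1 h2
    simp only [List.getElem_set, List.getElem_map, List.getElem_range]
    simp at h1
    by_cases hj : i = j
    · simp [hj]
    · simp [hj]
      intro h; exact absurd h.symm hj

theorem pvFoldA (p : List Char) : ∀ (t : Nat), t + 1 ≤ p.length →
    (List.range t).foldl (fun ch k => pvStep p ch (1 + (k : Nat))) (List.replicate p.length ' ')
      = (List.range p.length).map (fun j => if 1 ≤ j ∧ j < t + 1 then pvAChar p j else ' ') := by
  intro t
  induction t with
  | zero =>
    intro _
    rw [List.range_zero, List.foldl_nil]
    apply List.ext_getElem
    · simp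
    · intro j h1 h2
      simp only [List.getElem_replicate, List.getElem_map, List.getElem_range]
      split
      · omega
      · rfl
  | succ t ih =>
    intro ht
    rw [List.range_succ, List.foldl_append, List.foldl_cons, List.foldl_nil,
        ih (by omega)]
    have h1 : (1 : Int) + (t : Nat) = ((t + 1 : Nat) : Int) := by push_cast; ring
    have h2 : ((t + 1 : Nat) : Int) - 1 = ((t : Nat) : Int) := by push_cast; ring
    have h3 : ((t + 1 : Nat) : Int) + 1 = ((t + 2 : Nat) : Int) := by push_cast; ring
    simp only [pvStep, h1, h2, h3, PySem.List.pyGetD_natCast, PySem.List.pySetD_natCast]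
    have hchar : ∀ (v : Char),
        ((List.range p.length).map (fun j => if 1 ≤ j ∧ j < t + 1 then pvAChar p j else ' ')).set (t+1) v
        = (List.range p.length).map
            (fun j => if j = t + 1 then v else if 1 ≤ j ∧ j < t + 1 then pvAChar p j else ' ') := by
      intro v; rw [pvSet_map_range]
    by_cases c1 : p.getD (t+1) ' ' = '_'
    · by_cases c2 : p.getD t ' ' = ' '
      · rw [if_pos c1, if_pos c2, hchar]
        apply List.map_congr_left
        intro j hj
        by_cases hjt : j = t+1
        · subst hjt
          rw [if_pos rfl, if_pos (by omega : 1 ≤ t+1 ∧ t+1 < t+1+1)]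
          unfold pvAChar
          rw [if_pos (by simpa using ⟨c1, Or.inl c2⟩)]
        · rw [if_neg hjt]
          by_cases h1j : 1 ≤ j ∧ j < t+1
          · rw [if_pos h1j, if_pos (by omega)]
          · rw [if_neg h1j, if_neg (by omega)]
      · by_cases c3 : p.getD (t+2) ' ' = ' '
        · rw [if_pos c1, if_neg c2, if_pos c3, hchar]
          apply List.map_congr_left
          intro j hj
          by_cases hjt : j = t+1
          · subst hjt
            rw [if_pos rfl, if_pos (by omega : 1 ≤ t+1 ∧ t+1 < t+1+1)]
            unfold pvAChar
            rw [if_pos (by simpa using ⟨c1, Or.inr c3⟩)]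
          · rw [if_neg hjt]
            by_cases h1j : 1 ≤ j ∧ j < t+1
            · rw [if_pos h1j, if_pos (by omega)]
            · rw [if_neg h1j, if_neg (by omega)]
        · rw [if_pos c1, if_neg c2, if_neg c3]
          apply List.map_congr_left
          intro j hj
          by_cases hjt : j = t+1
          · subst hjt
            rw [if_neg (by omega : ¬(1 ≤ t+1 ∧ t+1 < t+1)), if_pos (by omega : 1 ≤ t+1 ∧ t+1 < t+1+1)]
            unfold pvAChar
            rw [if_neg (by simpa using fun h => fun (hor : _ ∨ _) => hor.elim c2 c3)]
          · by_cases h1j : 1 ≤ j ∧ j < t+1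
            · rw [if_pos h1j, if_pos (by omega)]
            · rw [if_neg h1j, if_neg (by omega)]
    · rw [if_neg c1]
      apply List.map_congr_left
      intro j hj
      by_cases hjt : j = t+1
      · subst hjt
        rw [if_neg (by omega : ¬(1 ≤ t+1 ∧ t+1 < t+1)), if_pos (by omega : 1 ≤ t+1 ∧ t+1 < t+1+1)]
        unfold pvAChar
        rw [if_neg (by simpa using fun h => absurd h c1)]
      · by_cases h1j : 1 ≤ j ∧ j < t+1
        · rw [if_pos h1j, if_pos (by omega)]
        · rw [if_neg h1j, if_neg (by omega)]

theorem pvGetD_pad (cs : List Char) (j : Nat) :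
    ((' ' :: cs ++ [' ']) : List Char).getD (j+1) ' ' = cs.getD j ' ' := by
  rcases Nat.lt_trichotomy j cs.length with h | h | h
  · simp [List.getD, List.getElem?_append_left h]
  · subst h
    simp [List.getD]
  · simp [List.getD]
    rw [List.getElem?_append_right (by omega), List.getElem?_eq_none (by simp; omega),
        List.getElem?_eq_none (by omega)]

theorem pvSpecGo_getD (cs : List Char) : ∀ (prev : Char) (j : Nat), j < cs.length →
    (pvSpecGo prev cs).getD j ' ' =
      if cs.getD j ' ' = '_' ∧ ((if j = 0 then prev else cs.getD (j-1) ' ') = ' '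
          ∨ cs.getD (j+1) ' ' = ' ') then '|' else ' ' := by
  induction cs with
  | nil => intro prev j h; simp at h
  | cons c rest ih =>
    intro prev j h
    cases j with
    | zero =>
      cases rest with
      | nil => simp [pvSpecGo, List.getD]
      | cons d r => simp [pvSpecGo, List.getD]
    | succ j =>
      have hj : j < rest.length := by simpa using h
      simp only [pvSpecGo, List.getD_cons_succ]
      rw [ih c j hj]
      cases j with
      | zero => simp [List.getD]
      | succ j' => simp [List.getD]

theorem pvA_eq_spec (cs : List Char) :
    (get_pipe_line (String.ofList cs)).toList = pvSpecGo ' ' cs := by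
  have hA : (get_pipe_line (String.ofList cs)).toList =
      (PySem.List.slice
        ((PySem.List.pyRange 1 (((' ' :: cs ++ [' '] : List Char).length : Int) - 1) 1).foldl
          (pvStep (' ' :: cs ++ [' '])) (List.replicate (' ' :: cs ++ [' '] : List Char).length ' '))
        (some 1) (some (-1))) := by
    simp only [get_pipe_line, String.toList_ofList]
    rfl
  rw [hA, PySem.List.pyRange_one]
  have hn : ((((' ' :: cs ++ [' '] : List Char).length : Int) - 1) - 1).toNat = cs.length := by
    simp
  rw [hn, List.foldl_map, pvFoldA _ _ (by simp)]
  set M : List Char := List.map (fun j => if 1 ≤ j ∧ j < cs.length + 1 then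
      pvAChar (' ' :: cs ++ [' ']) j else ' ') (List.range (' ' :: cs ++ [' '] : List Char).length)
    with hM
  have hml : M.length = cs.length + 2 := by simp [hM]
  have hslice : PySem.List.slice M (some 1) (some (-1)) = List.take cs.length (List.drop 1 M) := by
    simp [PySem.List.slice, hml]
  rw [hslice]
  apply List.ext_getElem
  · simp [pvSpecGo_length, hml]
  · intro i h1 h2
    have hi : i < cs.length := by
      simpa [pvSpecGo_length] using h2
    rw [List.getElem_take, List.getElem_drop]
    have hlt : 1 + i < (' ' :: cs ++ [' '] : List Char).length := by simp; omega
    simp only [hM, List.getElem_map, List.getElem_range]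
    rw [if_pos (by omega : 1 ≤ 1 + i ∧ 1 + i < cs.length + 1)]
    rw [show (pvSpecGo ' ' cs)[i] = (pvSpecGo ' ' cs).getD i ' ' from (List.getD_eq_getElem _ _ h2).symm]
    rw [pvSpecGo_getD cs ' ' i hi]
    have e1 : (' ' :: cs ++ [' '] : List Char).getD (1+i) ' ' = cs.getD i ' ' := by
      rw [Nat.add_comm]; exact pvGetD_pad cs i
    have e2 : (' ' :: cs ++ [' '] : List Char).getD (1+i-1) ' '
        = (if i = 0 then ' ' else cs.getD (i-1) ' ') := by
      cases i with
      | zero => simp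
      | succ j =>
        rw [show 1 + (j+1) - 1 = j + 1 by omega, pvGetD_pad cs j]
        simp
    have e3 : (' ' :: cs ++ [' '] : List Char).getD (1+i+1) ' ' = cs.getD (i+1) ' ' := by
      rw [show 1 + i + 1 = (i+1) + 1 by omega]; exact pvGetD_pad cs (i+1)
    unfold pvAChar
    rw [e1, e2, e3]

-- ===== VERDICT =====
theorem get_pipe_line_spec : Claim_equal_get_pipe_line := by
  intro s _
  unfold Spec_get_pipe_line get_pipe_line_alt
  rw [pvB_eq_spec]
  have h := pvA_eq_spec s.toList
  rw [show String.ofList s.toList = s from String.ofList_toList] at h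
  rw [← h, String.ofList_toList]
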